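-- pv_equiv track=rewrite | github.com/saurabhp369/HackerRank_solutions | Stock_Maximize.py | stockmax
-- ===== SOURCE A (Python) =====
-- def stockmax(prices):
--     # Write your code here
--     # initialize the local maxima to last day price
--     cur_max = prices[-1]
--     profit = 0
--     # looping backwards find the local maxima and profit
--     for i in range(len(prices)-1, -1, -1):
--         if prices[i] >= cur_max:
--             cur_max = prices[i]
--         profit+= cur_max - prices[i]
--
--     return profit
-- ===== SOURCE B (Python) =====
-- def stockmax(prices):
--     # Phase 1: build the suffix-maximum table (right to left).
--     cur = prices[-1]
--     suffix = []
--     for p in reversed(prices):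
--         if p > cur:
--             cur = p
--         suffix.append(cur)
--     suffix.reverse()
--     # Phase 2: forward pass summing future-max minus price.
--     return sum(m - p for m, p in zip(suffix, prices))
-- ===== Notes on version B (the rewrite author's own statement) =====
-- stated objective: alternative
-- what changed: B separates the computation into two phases - first building an explicit suffix-maximum table by folding over reversed(prices), then a forward zip-sum of suffix_max[i]-prices[i] - instead of A's single backward index loop that interleaves the running max with the profit accumulation.
import Mathlib
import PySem

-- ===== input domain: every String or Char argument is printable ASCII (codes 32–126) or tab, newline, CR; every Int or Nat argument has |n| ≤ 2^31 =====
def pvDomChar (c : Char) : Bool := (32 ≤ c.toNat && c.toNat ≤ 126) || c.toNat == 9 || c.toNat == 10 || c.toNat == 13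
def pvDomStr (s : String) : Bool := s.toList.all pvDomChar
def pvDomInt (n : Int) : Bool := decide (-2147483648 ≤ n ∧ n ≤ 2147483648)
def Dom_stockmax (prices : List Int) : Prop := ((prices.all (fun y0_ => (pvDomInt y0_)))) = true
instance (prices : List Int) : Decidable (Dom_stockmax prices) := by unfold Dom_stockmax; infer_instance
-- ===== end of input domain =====

-- B: two separate phases (build explicit suffix-max table, then forward zip-sum)
-- instead of A's single backward index loop interleaving max and profit; return values proved equal.

-- ===== PORT A =====
def stockmax (prices : List Int) : Int :=
  let cur0 := PySem.List.pyGetD prices (-1) 0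
  let st := (PySem.List.pyRange ((prices.length : Int) - 1) (-1) (-1)).foldl
    (fun (s : Int × Int) i =>
      let p := PySem.List.pyGetD prices i 0
      let cur := if p ≥ s.1 then p else s.1
      (cur, s.2 + (cur - p))) (cur0, 0)
  st.2

-- ===== PORT B =====
def stockmax_alt (prices : List Int) : Int :=
  let cur0 := PySem.List.pyGetD prices (-1) 0
  let st := prices.reverse.foldl (fun (s : Int × List Int) p =>
      let cur := if p > s.1 then p else s.1
      (cur, s.2 ++ [cur])) (cur0, [])
  let suffix := st.2.reverse
  (suffix.zip prices).foldl (fun acc mp => acc + (mp.1 - mp.2)) 0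

-- ===== PRECONDITION & SPEC =====
-- Pre_ excludes only the empty list, on which Python A raises IndexError (prices[-1]).
def Pre_stockmax (prices : List Int) : Prop := prices ≠ []
instance (prices : List Int) : Decidable (Pre_stockmax prices) := by unfold Pre_stockmax; infer_instance
def pvWitness_stockmax : List Int := ([1, 3, 1, 2])

def Spec_stockmax (prices : List Int) (out : Int) : Prop := out = stockmax_alt prices
instance (prices : List Int) (out : Int) : Decidable (Spec_stockmax prices out) := by unfold Spec_stockmax; infer_instance

-- ===== CLAIM (what is proved, stated in full; the proofs are below) =====
def Claim_equal_stockmax : Prop := ∀ (prices : List Int), Dom_stockmax prices → Pre_stockmax prices → Spec_stockmax prices (stockmax prices)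

-- ===== LEMMAS AND PROOFS =====

-- profit accumulated by A's loop, as a structural recursion over the reversed price list
def saRef : List Int → Int → Int
  | [], _ => 0
  | p :: t, cur => (max p cur - p) + saRef t (max p cur)

-- suffix-max entries produced by B's first loop (in produced, i.e. reversed, order)
def sbRef : List Int → Int → List Int
  | [], _ => []
  | p :: t, cur => max p cur :: sbRef t (max p cur)

-- Σ (a_i - b_i) over paired prefixes
def zsRef : List Int → List Int → Int
  | a :: as_, b :: bs => (a - b) + zsRef as_ bs
  | _, _ => 0

theorem foldlA_eq_saRef (l : List Int) : ∀ (cur profit : Int),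
    (l.foldl (fun (s : Int × Int) p =>
      (if p ≥ s.1 then p else s.1, s.2 + ((if p ≥ s.1 then p else s.1) - p))) (cur, profit)).2
      = profit + saRef l cur := by
  induction l with
  | nil => intro cur profit; simp [saRef]
  | cons p t ih =>
    intro cur profit
    simp only [List.foldl_cons, saRef]
    rw [ih]
    have h : (if p ≥ cur then p else cur) = max p cur := by
      split <;> omega
    rw [h]; ring

theorem foldlB_eq_sbRef (l : List Int) : ∀ (cur : Int) (acc : List Int),
    (l.foldl (fun (s : Int × List Int) p =>
      (if p > s.1 then p else s.1, s.2 ++ [if p > s.1 then p else s.1])) (cur, acc)).2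
      = acc ++ sbRef l cur := by
  induction l with
  | nil => intro cur acc; simp [sbRef]
  | cons p t ih =>
    intro cur acc
    simp only [List.foldl_cons, sbRef]
    rw [ih]
    have h : (if p > cur then p else cur) = max p cur := by
      split <;> omega
    rw [h, List.append_assoc]; rfl

theorem foldl_zip_eq_zsRef (a : List Int) : ∀ (b : List Int) (acc : Int),
    ((a.zip b).foldl (fun acc (mp : Int × Int) => acc + (mp.1 - mp.2)) acc) = acc + zsRef a b := by
  induction a with
  | nil => intro b acc; simp [zsRef]
  | cons x xs ih =>
    intro b acc
    cases b with
    | nil => simp [zsRef]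
    | cons y ys => simp only [List.zip_cons_cons, List.foldl_cons, zsRef]; rw [ih]; ring

theorem saRef_eq_zsRef (l : List Int) : ∀ cur, saRef l cur = zsRef (sbRef l cur) l := by
  induction l with
  | nil => intro cur; simp [saRef, sbRef, zsRef]
  | cons p t ih => intro cur; simp only [saRef, sbRef, zsRef]; rw [ih]

theorem zsRef_eq_sum_zipWith (a : List Int) : ∀ (b : List Int),
    zsRef a b = (List.zipWith (fun x y => x - y) a b).sum := by
  induction a with
  | nil => intro b; simp [zsRef]
  | cons x xs ih =>
    intro b
    cases b with
    | nil => simp [zsRef]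
    | cons y ys => simp [zsRef, ih]

theorem length_sbRef (l : List Int) : ∀ cur, (sbRef l cur).length = l.length := by
  induction l with
  | nil => intro cur; simp [sbRef]
  | cons p t ih => intro cur; simp [sbRef, ih]

theorem zsRef_reverse (a b : List Int) (h : a.length = b.length) :
    zsRef a.reverse b.reverse = zsRef a b := by
  rw [zsRef_eq_sum_zipWith, zsRef_eq_sum_zipWith, ← List.reverse_zipWith h, List.sum_reverse]

-- ===== VERDICT (by name: the statement is the Claim_ definition above) =====
theorem stockmax_spec : Claim_equal_stockmax := by
  intro prices _ _
  have hrange : PySem.List.pyRange ((prices.length : Int) - 1) (-1) (-1)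
      = (PySem.List.pyRange 0 (prices.length : Int) 1).reverse := by
    rw [PySem.List.pyRange_neg_one_eq_reverse]
    norm_num
  have hmap : ((PySem.List.pyRange 0 (prices.length : Int) 1).reverse.map
      (fun i => PySem.List.pyGetD prices i 0)) = prices.reverse := by
    rw [List.map_reverse, PySem.List.map_pyGetD_pyRange_zero']
  have hA : ((PySem.List.pyRange 0 (prices.length : Int) 1).reverse.foldl
      (fun (s : Int × Int) i =>
        (if PySem.List.pyGetD prices i 0 ≥ s.1 then PySem.List.pyGetD prices i 0 else s.1,
         s.2 + ((if PySem.List.pyGetD prices i 0 ≥ s.1 then PySem.List.pyGetD prices i 0 else s.1)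
                 - PySem.List.pyGetD prices i 0))) (PySem.List.pyGetD prices (-1) 0, 0))
      = (prices.reverse.foldl
      (fun (s : Int × Int) p =>
        (if p ≥ s.1 then p else s.1, s.2 + ((if p ≥ s.1 then p else s.1) - p)))
        (PySem.List.pyGetD prices (-1) 0, 0)) := by
    rw [← hmap, List.foldl_map]
  unfold Spec_stockmax
  simp only [stockmax, stockmax_alt]
  rw [hrange, hA, foldlA_eq_saRef, foldlB_eq_sbRef, foldl_zip_eq_zsRef]
  simp only [List.nil_append, zero_add]
  rw [saRef_eq_zsRef]
  have hz := zsRef_reverse (sbRef prices.reverse (PySem.List.pyGetD prices (-1) 0))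
      prices.reverse (by rw [length_sbRef])
  rw [← hz, List.reverse_reverse]
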